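-- pv_equiv track=rewrite | github.com/El-Congroo/AOC-22 | 2023/Day14.py | rotatePlatformOften
-- ===== SOURCE A (Python) =====
-- def rotatePlatformOnce(platform):
--     for _ in range(4): # directions
--         newPlat = []
--         for row in [list(x) for x in zip(*reversed(platform))]: # each row
--             for i in range(len(row)): # n times
--                 changes = False
--                 for j in range(len(row)-1): # go over row
--                     if row[j] == 'O' and row[j+1] == '.':
--                         row[j] = '.'
--                         row[j+1] = 'O'
--                         changes = True
--                 if not changes:
--                     break
--             newPlat.append(row)
--         platform = newPlat
--     return platform
--
-- def rotatePlatformOften(platform):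
--     iter = 0
--     d = {}
--     ROTATECNT = 1000000000
--     while iter < ROTATECNT:
--         iter += 1
--         platform = rotatePlatformOnce(platform)
--         state = tuple(tuple(a) for a in platform)
--         if state in d:
--             rest = ROTATECNT - iter
--             stepsize = iter - d[state]
--             iter += (rest // stepsize) * stepsize
--         else :
--             d[state] = iter
--     return platform
-- ===== SOURCE B (Python) =====
-- ROTATECNT = 1000000000
--
-- def _tiltRowRight(row):
--     # single pass: pack each maximal run of 'O'/'.' cells as dots-then-rocks
--     out = []
--     dots = rocks = 0
--     for c in row:
--         if c == 'O':
--             rocks += 1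
--         elif c == '.':
--             dots += 1
--         else:
--             out.extend(['.'] * dots + ['O'] * rocks)
--             out.append(c)
--             dots = rocks = 0
--     out.extend(['.'] * dots + ['O'] * rocks)
--     return out
--
-- def _spin(platform):
--     for _ in range(4):
--         platform = [_tiltRowRight(list(x)) for x in zip(*reversed(platform))]
--     return platform
--
-- def rotatePlatformOften(platform):
--     seen = {}
--     history = []
--     cur = platform
--     i = 0
--     while i < ROTATECNT:
--         cur = _spin(cur)
--         i += 1
--         key = tuple(tuple(r) for r in cur)
--         if key in seen:
--             start = seen[key]
--             cyc = i - start
--             idx = start + (ROTATECNT - start) % cyc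
--             return [list(r) for r in history[idx - 1]]
--         seen[key] = i
--         history.append(key)
--     return cur
-- ===== Notes on version B (the rewrite author's own statement) =====
-- stated objective: alternative
-- what changed: Each tilted row is packed in one pass (count rocks/gaps per wall-free segment and emit dots-then-rocks) instead of A's repeated bubble sweeps, and the cycle is resolved by indexing a stored history list with modular arithmetic instead of A's dict-guided skip followed by step-by-step simulation of the remainder.
import Mathlib
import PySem

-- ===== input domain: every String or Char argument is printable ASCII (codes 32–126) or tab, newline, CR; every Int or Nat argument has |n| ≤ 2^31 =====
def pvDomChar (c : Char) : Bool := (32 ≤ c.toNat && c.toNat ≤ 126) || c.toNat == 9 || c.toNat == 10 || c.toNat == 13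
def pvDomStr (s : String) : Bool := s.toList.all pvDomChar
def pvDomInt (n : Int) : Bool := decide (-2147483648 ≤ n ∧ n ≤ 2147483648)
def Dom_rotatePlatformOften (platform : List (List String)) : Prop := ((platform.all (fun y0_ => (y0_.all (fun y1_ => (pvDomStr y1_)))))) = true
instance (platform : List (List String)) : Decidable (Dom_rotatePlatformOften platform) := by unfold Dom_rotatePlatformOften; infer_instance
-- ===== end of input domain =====

-- B replaces A's per-row bubble sweeps by a single-pass segment packing and resolves the
-- 10^9-cycle by modular indexing into a stored history (objective: alternative).

-- ===== PORT A =====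
-- zip(*reversed(platform)) — shared by both Pythons verbatim; columns truncate at the
-- shortest row; getD is exact because i < every row length by construction of the range.
def pyRotate (p : List (List String)) : List (List String) :=
  match p.reverse with
  | [] => []
  | r :: rs =>
      (List.range (((r :: rs).map List.length).min?.getD 0)).map
        (fun i => (r :: rs).map (fun q => q.getD i ""))

-- body of A's inner "for j in range(len(row)-1)": indices j, j+1 are always in range,
-- so List.getD / List.set are exact for Python's row[j] reads and writes
def sweepStepA (rc : List String × Bool) (j : Nat) : List String × Bool :=
  if rc.1.getD j "" = "O" ∧ rc.1.getD (j + 1) "" = "." then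
    ((rc.1.set j ".").set (j + 1) "O", true)
  else rc

def jSweep (row : List String) : List String × Bool :=
  (List.range (row.length - 1)).foldl sweepStepA (row, false)

-- A's "for i in range(len(row)) … if not changes: break"
def iLoopA : Nat → List String → List String
  | 0, row => row
  | k + 1, row =>
      let rc := jSweep row
      if rc.2 then iLoopA k rc.1 else rc.1

def tiltRowA (row : List String) : List String := iLoopA row.length row

-- rotatePlatformOnce: "for _ in range(4)", newPlat built by appending = map
def rotateOnceA (p : List (List String)) : List (List String) :=
  (List.range 4).foldl (fun q _ => (pyRotate q).map tiltRowA) p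

-- A's while-loop; fuel only makes the recursion total: each call increases iter by ≥ 1 and
-- the loop stops as soon as 10^9 ≤ iter, so fuel 10^9 is never the reason it stops.
def loopA : Nat → Nat → PySem.Dict (List (List String)) Nat → List (List String) → List (List String)
  | 0, _, _, p => p
  | fuel + 1, iter, d, p =>
      if 1000000000 ≤ iter then p
      else
        let it1 := iter + 1
        let p1 := rotateOnceA p
        match d.get? p1 with
        | some prev =>
            loopA fuel (it1 + ((1000000000 - it1) / (it1 - prev)) * (it1 - prev)) d p1
        | none => loopA fuel it1 (d.insert p1 it1) p1

def rotatePlatformOften (platform : List (List String)) : List (List String) :=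
  loopA 1000000000 0 PySem.Dict.empty platform

-- ===== PORT B =====
-- Source B's single-pass row packing: fold carrying (out, dots, rocks)
def stepB (s : List String × Nat × Nat) (c : String) : List String × Nat × Nat :=
  if c = "O" then (s.1, s.2.1, s.2.2 + 1)
  else if c = "." then (s.1, s.2.1 + 1, s.2.2)
  else (s.1 ++ List.replicate s.2.1 "." ++ List.replicate s.2.2 "O" ++ [c], 0, 0)

def tiltRowB (row : List String) : List String :=
  let s := row.foldl stepB ([], 0, 0)
  s.1 ++ List.replicate s.2.1 "." ++ List.replicate s.2.2 "O"

def spinB (p : List (List String)) : List (List String) :=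
  (List.range 4).foldl (fun q _ => (pyRotate q).map tiltRowB) p

-- Source B's while-loop with history list; on a repeat it returns history[idx-1] directly
-- (idx-1 is in range, so getD is exact). Fuel as in loopA.
def loopB : Nat → Nat → PySem.Dict (List (List String)) Nat → List (List (List String)) →
    List (List String) → List (List String)
  | 0, _, _, _, cur => cur
  | fuel + 1, i, seen, history, cur =>
      if 1000000000 ≤ i then cur
      else
        let cur1 := spinB cur
        let i1 := i + 1
        match seen.get? cur1 with
        | some start =>
            history.getD (start + (1000000000 - start) % (i1 - start) - 1) []
        | none => loopB fuel i1 (seen.insert cur1 i1) (history ++ [cur1]) cur1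

def rotatePlatformOften_alt (platform : List (List String)) : List (List String) :=
  loopB 1000000000 0 PySem.Dict.empty [] platform

-- ===== PRECONDITION & SPEC =====
def Spec_rotatePlatformOften (platform : List (List String)) (out : List (List String)) : Prop := out = rotatePlatformOften_alt platform
instance (platform : List (List String)) (out : List (List String)) : Decidable (Spec_rotatePlatformOften platform out) := by unfold Spec_rotatePlatformOften; infer_instance

-- ===== CLAIM (what is proved, stated in full; the proofs are below) =====
def Claim_equal_rotatePlatformOften : Prop := ∀ (platform : List (List String)), Dom_rotatePlatformOften platform → Spec_rotatePlatformOften platform (rotatePlatformOften platform)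

-- ===== LEMMAS AND PROOFS =====

-- ---- A's row sweep as a carried recursion ----
def goA : String → List String → List String
  | a, [] => [a]
  | a, b :: r => if a = "O" ∧ b = "." then "." :: goA "O" r else a :: goA b r

def chA : String → List String → Bool
  | _, [] => false
  | a, b :: r => if a = "O" ∧ b = "." then true else chA b r

def pass1 : List String → List String
  | [] => []
  | a :: t => goA a t

def chpass : List String → Bool
  | [] => false
  | a :: t => chA a t

def isFree (c : String) : Bool := c == "O" || c == "."

theorem bridge (rest : List String) : ∀ (cur : String) (pre : List String) (c : Bool),
    List.foldl sweepStepA (pre ++ cur :: rest, c) (List.range' pre.length rest.length)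
      = (pre ++ goA cur rest, c || chA cur rest) := by
  induction rest with
  | nil => intro cur pre c; simp [goA, chA]
  | cons b r ih =>
    intro cur pre c
    rw [show (b :: r).length = r.length + 1 from rfl, List.range'_succ, List.foldl_cons]
    by_cases h : cur = "O" ∧ b = "."
    · have hstep : sweepStepA (pre ++ cur :: b :: r, c) pre.length = (pre ++ "." :: "O" :: r, true) := by
        obtain ⟨h1, h2⟩ := h; subst h1; subst h2
        simp [sweepStepA]
      rw [hstep]
      have h' := ih "O" (pre ++ ["."]) true
      simp only [List.length_append, List.length_cons, List.length_nil, Nat.zero_add,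
        List.append_assoc, List.cons_append, List.nil_append] at h'
      rw [h']
      simp [goA, chA, h]
    · have hstep : sweepStepA (pre ++ cur :: b :: r, c) pre.length = (pre ++ cur :: b :: r, c) := by
        simp only [sweepStepA]
        rw [if_neg]
        simpa [List.getD_append_right] using h
      rw [hstep]
      have h' := ih b (pre ++ [cur]) c
      simp only [List.length_append, List.length_cons, List.length_nil, Nat.zero_add,
        List.append_assoc, List.cons_append, List.nil_append] at h'
      rw [h']
      simp [goA, chA, h]

theorem jSweep_eq (row : List String) : jSweep row = (pass1 row, chpass row) := by
  cases row with
  | nil => simp [jSweep, pass1, chpass]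
  | cons a t =>
    have h := bridge t a [] false
    simp only [List.length_nil, List.nil_append, Bool.false_or] at h
    simpa [jSweep, pass1, chpass, List.range_eq_range'] using h

theorem chA_false (t : List String) : ∀ a, chA a t = false → goA a t = a :: t := by
  induction t with
  | nil => intro a _; rfl
  | cons b r ih =>
    intro a h
    by_cases hs : a = "O" ∧ b = "."
    · simp [chA, hs] at h
    · rw [chA, if_neg hs] at h
      rw [goA, if_neg hs, ih b h]

theorem iLoopA_eq (k : Nat) : ∀ row, iLoopA k row = pass1^[k] row := by
  induction k with
  | zero => intro row; rfl
  | succ k ih =>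
    intro row
    simp only [iLoopA, jSweep_eq]
    by_cases h : chpass row = true
    · simp [h, ih, Function.iterate_succ_apply]
    · have h' : chpass row = false := by simpa using h
      have hfix : pass1 row = row := by
        cases row with
        | nil => rfl
        | cons a t => exact chA_false t a h'
      simp [h', hfix, Function.iterate_fixed hfix]

-- ---- structure of pass1 on wall-free segments ----
def packGo : Nat → Nat → List String → List String
  | d, o, [] => List.replicate d "." ++ List.replicate o "O"
  | d, o, c :: t =>
      if c = "O" then packGo d (o + 1) t
      else if c = "." then packGo (d + 1) o t
      else List.replicate d "." ++ List.replicate o "O" ++ c :: packGo 0 0 t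

theorem pass1_cons_not_O (c : String) (t : List String) (h : c ≠ "O") :
    pass1 (c :: t) = c :: pass1 t := by
  cases t with
  | nil => simp [pass1, goA]
  | cons b r => simp [pass1, goA, h]

theorem goA_O_free (t : List String) : ∀ u, (∀ c ∈ t, isFree c = true) →
    goA "O" (t ++ u) = t ++ goA "O" u := by
  induction t with
  | nil => intro u _; rfl
  | cons c t' ih =>
    intro u h
    have hc : c = "O" ∨ c = "." := by simpa [isFree] using h c (by simp)
    have ht' : ∀ x ∈ t', isFree x = true := fun x hx => h x (by simp [hx])
    rcases hc with hc | hc <;> subst hc <;> simp [goA, ih u ht']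

theorem pass1_O_free (t : List String) (h : ∀ c ∈ t, isFree c = true) :
    pass1 ("O" :: t) = t ++ ["O"] := by
  have := goA_O_free t [] h
  simpa [pass1] using this

theorem pass1_dots_prefix (a : Nat) : ∀ u, pass1 (List.replicate a "." ++ u) = List.replicate a "." ++ pass1 u := by
  induction a with
  | zero => intro u; simp
  | succ a ih =>
    intro u
    rw [List.replicate_succ, List.cons_append, pass1_cons_not_O _ _ (by decide), ih,
      List.cons_append]

theorem pass1_rep_O (j : Nat) : pass1 (List.replicate j "O") = List.replicate j "O" := by
  cases j with
  | zero => rfl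
  | succ j =>
    rw [List.replicate_succ, pass1_O_free (List.replicate j "O") (by intro c hc; simp [List.eq_of_mem_replicate hc]; rfl)]
    rw [← List.replicate_succ', List.replicate_succ]

theorem pass1_trailing_nil (j : Nat) :
    pass1 ([] ++ List.replicate j "O") = pass1 [] ++ List.replicate j "O" := by
  simp only [List.nil_append]
  rw [pass1_rep_O]
  simp [pass1]

theorem pass1_wall_nil (w : String) (rest : List String) (hw : isFree w = false) :
    pass1 ([] ++ w :: rest) = pass1 [] ++ w :: pass1 rest := by
  have hwO : w ≠ "O" := by intro h; subst h; simp [isFree] at hw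
  rw [List.nil_append, pass1_cons_not_O w rest hwO]
  simp [pass1]

theorem all_dots (t : List String) (h : ∀ c ∈ t, isFree c = true) (h0 : t.count "O" = 0) :
    t = List.replicate (t.count ".") "." := by
  induction t with
  | nil => rfl
  | cons c t' ih =>
    have hc : c = "O" ∨ c = "." := by simpa [isFree] using h c (by simp)
    have ht' : ∀ x ∈ t', isFree x = true := fun x hx => h x (by simp [hx])
    rcases hc with hc | hc <;> subst hc
    · simp at h0
    · have h0' : t'.count "O" = 0 := by simpa [List.count_cons] using h0
      rw [List.count_cons]
      simp only [BEq.rfl, if_true]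
      rw [List.replicate_succ]
      exact congrArg _ (ih ht' h0')

theorem pass1_fix_dots (t : List String) (h : ∀ c ∈ t, isFree c = true) (h0 : t.count "O" = 0) :
    pass1 t = t := by
  have hd := all_dots t h h0
  have h1 : pass1 (List.replicate (t.count ".") ".") = List.replicate (t.count ".") "." := by
    have := pass1_dots_prefix (t.count ".") []
    simpa [pass1] using this
  rw [hd]; exact h1

theorem foldB_eq (row : List String) : ∀ out d o,
    (let s := row.foldl stepB (out, d, o); s.1 ++ List.replicate s.2.1 "." ++ List.replicate s.2.2 "O")
      = out ++ packGo d o row := by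
  induction row with
  | nil => intro out d o; simp [packGo]
  | cons c t ih =>
    intro out d o
    by_cases hO : c = "O"
    · simp only [List.foldl_cons, stepB, packGo]
      rw [if_pos hO, if_pos hO]
      simpa using ih out d (o + 1)
    · by_cases hD : c = "."
      · simp only [List.foldl_cons, stepB, packGo]
        rw [if_neg hO, if_pos hD, if_neg hO, if_pos hD]
        simpa using ih out (d + 1) o
      · simp only [List.foldl_cons, stepB, packGo]
        rw [if_neg hO, if_neg hD, if_neg hO, if_neg hD]
        have := ih (out ++ List.replicate d "." ++ List.replicate o "O" ++ [c]) 0 0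
        simp only [this]
        simp

theorem packGo_free (t : List String) : ∀ d o, (∀ c ∈ t, isFree c = true) →
    packGo d o t = List.replicate (d + t.count ".") "." ++ List.replicate (o + t.count "O") "O" := by
  induction t with
  | nil => intro d o _; simp [packGo]
  | cons c t' ih =>
    intro d o h
    have hc : c = "O" ∨ c = "." := by simpa [isFree] using h c (by simp)
    have ht' : ∀ x ∈ t', isFree x = true := fun x hx => h x (by simp [hx])
    rcases hc with hc | hc <;> subst hc
    · rw [packGo, if_pos rfl, ih d (o + 1) ht']
      have e1 : ("O" :: t').count "O" = t'.count "O" + 1 := by simp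
      have e2 : ("O" :: t').count "." = t'.count "." := by simp
      rw [e1, e2]
      congr 2
      omega
    · rw [packGo, if_neg (by decide), if_pos rfl, ih (d + 1) o ht']
      have e1 : ("." :: t').count "O" = t'.count "O" := by simp
      have e2 : ("." :: t').count "." = t'.count "." + 1 := by simp
      rw [e1, e2]
      congr 2
      omega

theorem packGo_wall (t : List String) : ∀ d o w rest, (∀ c ∈ t, isFree c = true) → isFree w = false →
    packGo d o (t ++ w :: rest) =
      List.replicate (d + t.count ".") "." ++ List.replicate (o + t.count "O") "O" ++ w :: packGo 0 0 rest := by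
  induction t with
  | nil =>
    intro d o w rest _ hw
    have hwO : w ≠ "O" := by intro hh; subst hh; simp [isFree] at hw
    have hwD : w ≠ "." := by intro hh; subst hh; simp [isFree] at hw
    simp only [List.nil_append, packGo]
    rw [if_neg hwO, if_neg hwD]
    simp
  | cons c t' ih =>
    intro d o w rest h hw
    have hc : c = "O" ∨ c = "." := by simpa [isFree] using h c (by simp)
    have ht' : ∀ x ∈ t', isFree x = true := fun x hx => h x (by simp [hx])
    rcases hc with hc | hc <;> subst hc
    · rw [List.cons_append, packGo, if_pos rfl, ih d (o + 1) w rest ht' hw]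
      have e1 : ("O" :: t').count "O" = t'.count "O" + 1 := by simp
      have e2 : ("O" :: t').count "." = t'.count "." := by simp
      rw [e1, e2]
      congr 3
      omega
    · rw [List.cons_append, packGo, if_neg (by decide), if_pos rfl, ih (d + 1) o w rest ht' hw]
      have e1 : ("." :: t').count "O" = t'.count "O" := by simp
      have e2 : ("." :: t').count "." = t'.count "." + 1 := by simp
      rw [e1, e2]
      congr 3
      omega

theorem pass1_free (t : List String) (h : ∀ c ∈ t, isFree c = true) :
    ∀ c ∈ pass1 t, isFree c = true := by
  induction t with
  | nil => simp [pass1]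
  | cons c t' ih =>
    have hc : c = "O" ∨ c = "." := by simpa [isFree] using h c (by simp)
    have ht' : ∀ x ∈ t', isFree x = true := fun x hx => h x (by simp [hx])
    rcases hc with hc | hc <;> subst hc
    · rw [pass1_O_free t' ht']
      intro x hx
      rcases List.mem_append.mp hx with hx | hx
      · exact ht' x hx
      · simp at hx; subst hx; rfl
    · rw [pass1_cons_not_O _ _ (by decide)]
      intro x hx
      rcases List.mem_cons.mp hx with hx | hx
      · subst hx; rfl
      · exact ih ht' x hx

theorem pass1_trailing (t : List String) : ∀ j, (∀ c ∈ t, isFree c = true) →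
    pass1 (t ++ List.replicate j "O") = pass1 t ++ List.replicate j "O" := by
  induction t with
  | nil => intro j _; exact pass1_trailing_nil j
  | cons c t' ih =>
    intro j h
    have hc : c = "O" ∨ c = "." := by simpa [isFree] using h c (by simp)
    have ht' : ∀ x ∈ t', isFree x = true := fun x hx => h x (by simp [hx])
    rcases hc with hc | hc <;> subst hc
    · have hfree2 : ∀ x ∈ t' ++ List.replicate j "O", isFree x = true := by
        intro x hx
        rcases List.mem_append.mp hx with hx | hx
        · exact ht' x hx
        · simp [List.eq_of_mem_replicate hx]; rfl
      rw [List.cons_append, pass1_O_free _ hfree2, pass1_O_free t' ht']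
      have e : List.replicate j "O" ++ ["O"] = "O" :: List.replicate j "O" := by
        rw [← List.replicate_succ', List.replicate_succ]
      calc t' ++ List.replicate j "O" ++ ["O"]
          = t' ++ (List.replicate j "O" ++ ["O"]) := by rw [List.append_assoc]
        _ = t' ++ ("O" :: List.replicate j "O") := by rw [e]
        _ = t' ++ ["O"] ++ List.replicate j "O" := by simp
    · rw [List.cons_append, pass1_cons_not_O _ _ (by decide), pass1_cons_not_O _ _ (by decide),
        ih j ht', List.cons_append]

theorem pass1_wall (t : List String) : ∀ w rest, (∀ c ∈ t, isFree c = true) → isFree w = false →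
    pass1 (t ++ w :: rest) = pass1 t ++ w :: pass1 rest := by
  induction t with
  | nil => intro w rest _ hw; exact pass1_wall_nil w rest hw
  | cons c t' ih =>
    intro w rest h hw
    have hc : c = "O" ∨ c = "." := by simpa [isFree] using h c (by simp)
    have ht' : ∀ x ∈ t', isFree x = true := fun x hx => h x (by simp [hx])
    have hwO : w ≠ "O" := by intro hh; subst hh; simp [isFree] at hw
    have hwD : w ≠ "." := by intro hh; subst hh; simp [isFree] at hw
    rcases hc with hc | hc <;> subst hc
    · rw [List.cons_append, pass1, goA_O_free t' (w :: rest) ht', pass1_O_free t' ht']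
      have e1 : goA "O" (w :: rest) = "O" :: goA w rest := by
        rw [goA, if_neg (by simp [hwD])]
      have e2 : goA w rest = w :: pass1 rest := by
        have := pass1_cons_not_O w rest hwO
        simpa [pass1] using this
      rw [e1, e2]; simp
    · rw [List.cons_append, pass1_cons_not_O _ _ (by decide), pass1_cons_not_O _ _ (by decide),
        ih w rest ht' hw, List.cons_append]

theorem pass1_iter_trailing (k : Nat) : ∀ t j, (∀ c ∈ t, isFree c = true) →
    pass1^[k] (t ++ List.replicate j "O") = pass1^[k] t ++ List.replicate j "O" := by
  induction k with
  | zero => intro t j _; rfl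
  | succ k ih =>
    intro t j h
    rw [Function.iterate_succ_apply, Function.iterate_succ_apply, pass1_trailing t j h,
      ih (pass1 t) j (pass1_free t h)]

theorem pass1_iter_wall (k : Nat) : ∀ t w rest, (∀ c ∈ t, isFree c = true) → isFree w = false →
    pass1^[k] (t ++ w :: rest) = pass1^[k] t ++ w :: pass1^[k] rest := by
  induction k with
  | zero => intro t w rest _ _; rfl
  | succ k ih =>
    intro t w rest h hw
    rw [Function.iterate_succ_apply, Function.iterate_succ_apply, Function.iterate_succ_apply,
      pass1_wall t w rest h hw, ih (pass1 t) w (pass1 rest) (pass1_free t h) hw]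

theorem decompFirstO (t : List String) : (∀ c ∈ t, isFree c = true) → t.count "O" ≠ 0 →
    ∃ a t2, t = List.replicate a "." ++ "O" :: t2 := by
  induction t with
  | nil => intro _ h0; simp at h0
  | cons c t' ih =>
    intro h h0
    have hc : c = "O" ∨ c = "." := by simpa [isFree] using h c (by simp)
    have ht' : ∀ x ∈ t', isFree x = true := fun x hx => h x (by simp [hx])
    rcases hc with hc | hc <;> subst hc
    · exact ⟨0, t', by simp⟩
    · have h0' : t'.count "O" ≠ 0 := by simpa [List.count_cons] using h0
      obtain ⟨a, t2, ht⟩ := ih ht' h0'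
      exact ⟨a + 1, t2, by rw [ht, List.replicate_succ]; simp⟩

theorem pass1_iter_free : ∀ (m : Nat) (t : List String) (k : Nat), (∀ c ∈ t, isFree c = true) →
    t.count "O" = m → m ≤ k →
    pass1^[k] t = List.replicate (t.count ".") "." ++ List.replicate (t.count "O") "O" := by
  intro m
  induction m with
  | zero =>
    intro t k h hc _
    rw [Function.iterate_fixed (pass1_fix_dots t h hc), hc]
    simpa using all_dots t h hc
  | succ m ih =>
    intro t k h hc hk
    obtain ⟨a, t2, rfl⟩ := decompFirstO t h (by omega)
    obtain ⟨k', rfl⟩ : ∃ k', k = k' + 1 := ⟨k - 1, by omega⟩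
    have hfree2 : ∀ x ∈ t2, isFree x = true := by
      intro x hx; exact h x (by simp [hx])
    have hfreeu : ∀ x ∈ List.replicate a "." ++ t2, isFree x = true := by
      intro x hx
      rcases List.mem_append.mp hx with hx | hx
      · simp [List.eq_of_mem_replicate hx]; rfl
      · exact hfree2 x hx
    have hcu : (List.replicate a "." ++ t2).count "O" = m := by
      simp [List.count_append, List.count_replicate] at hc ⊢
      omega
    rw [Function.iterate_succ_apply, pass1_dots_prefix, pass1_O_free t2 hfree2]
    have e1 : List.replicate a "." ++ (t2 ++ ["O"]) = (List.replicate a "." ++ t2) ++ List.replicate 1 "O" := by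
      simp
    rw [e1, pass1_iter_trailing k' _ 1 hfreeu,
      ih (List.replicate a "." ++ t2) k' hfreeu hcu (by omega)]
    have hdot : (List.replicate a "." ++ t2).count "." = (List.replicate a "." ++ "O" :: t2).count "." := by
      simp [List.count_append]
    have hOc : (List.replicate a "." ++ "O" :: t2).count "O" = m + 1 := hc
    rw [hdot, hOc, hcu, List.append_assoc, ← List.replicate_add]

theorem master_aux : ∀ (n : Nat) (t : List String), t.length ≤ n → ∀ k, t.length ≤ k →
    pass1^[k] t = packGo 0 0 t := by
  intro n
  induction n with
  | zero =>
    intro t ht k _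
    have : t = [] := List.eq_nil_of_length_eq_zero (by omega)
    subst this
    rw [Function.iterate_fixed (show pass1 [] = [] from rfl)]
    rfl
  | succ n ih =>
    intro t ht k hk
    have hsplit : t.takeWhile isFree ++ t.dropWhile isFree = t := List.takeWhile_append_dropWhile
    have hfree : ∀ c ∈ t.takeWhile isFree, isFree c = true := fun c hc => List.mem_takeWhile_imp hc
    cases hrr : t.dropWhile isFree with
    | nil =>
      have ht' : t.takeWhile isFree = t := by
        conv_rhs => rw [← hsplit, hrr]
        rw [List.append_nil]
      have hfreet : ∀ c ∈ t, isFree c = true := fun c hc => hfree c (by rw [ht']; exact hc)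
      have hcnt : t.count "O" ≤ k := le_trans List.count_le_length hk
      rw [pass1_iter_free (t.count "O") t k hfreet rfl hcnt, packGo_free t 0 0 hfreet]
      simp
    | cons w r' =>
      have hw : isFree w = false := by
        have := List.head?_dropWhile_not isFree t
        rw [hrr] at this; simpa using this
      have hteq : t = t.takeWhile isFree ++ w :: r' := by conv_lhs => rw [← hsplit, hrr]
      have hlen : (t.takeWhile isFree).length + (r'.length + 1) = t.length := by
        conv_rhs => rw [hteq]
        simp
      conv_lhs => rw [hteq]
      conv_rhs => rw [hteq]
      rw [pass1_iter_wall k _ w r' hfree hw,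
        pass1_iter_free ((t.takeWhile isFree).count "O") _ k hfree rfl
          (le_trans List.count_le_length (by omega)),
        ih r' (by omega) k (by omega),
        packGo_wall _ 0 0 w r' hfree hw]
      simp

theorem tiltRowB_eq (row : List String) : tiltRowB row = packGo 0 0 row := by
  have := foldB_eq row [] 0 0
  simpa [tiltRowB] using this

theorem tilt_eq (row : List String) : tiltRowA row = tiltRowB row := by
  rw [tiltRowA, iLoopA_eq, tiltRowB_eq]
  exact master_aux row.length row le_rfl row.length le_rfl

theorem spin_eq : rotateOnceA = spinB := by
  have h : tiltRowA = tiltRowB := funext tilt_eq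
  funext p
  simp [rotateOnceA, spinB, h]

-- ---- outer loops ----
theorem periodic {α : Type} (f : α → α) (x : α) (a L : Nat)
    (hL : f^[a + L] x = f^[a] x) : ∀ t m, f^[a + t + m * L] x = f^[a + t] x := by
  intro t m
  induction m with
  | zero => simp
  | succ m ih =>
    have e : a + t + (m + 1) * L = (t + m * L) + (a + L) := by ring
    rw [e, Function.iterate_add_apply, hL, ← Function.iterate_add_apply,
      show t + m * L + a = a + t + m * L by ring, ih]

def InvA (p0 : List (List String)) (d : PySem.Dict (List (List String)) Nat) (iter : Nat) : Prop :=
  ∀ s j, d.get? s = some j → s = rotateOnceA^[j] p0 ∧ 1 ≤ j ∧ j ≤ iter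

theorem loopA_eq (p0 : List (List String)) : ∀ fuel iter d p,
    1000000000 - iter ≤ fuel → iter ≤ 1000000000 → p = rotateOnceA^[iter] p0 →
    InvA p0 d iter → loopA fuel iter d p = rotateOnceA^[1000000000] p0 := by
  intro fuel
  induction fuel with
  | zero =>
    intro iter d p hf hle hp _
    have : iter = 1000000000 := by omega
    rw [loopA, hp, this]
  | succ fuel ih =>
    intro iter d p hf hle hp hinv
    rw [loopA]
    by_cases hstop : 1000000000 ≤ iter
    · rw [if_pos hstop, hp, show iter = 1000000000 by omega]
    · rw [if_neg hstop]
      show (match d.get? (rotateOnceA p) with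
        | some prev => loopA fuel (iter + 1 + (1000000000 - (iter + 1)) / (iter + 1 - prev) * (iter + 1 - prev)) d (rotateOnceA p)
        | none => loopA fuel (iter + 1) (d.insert (rotateOnceA p) (iter + 1)) (rotateOnceA p))
        = rotateOnceA^[1000000000] p0
      have hp1 : rotateOnceA p = rotateOnceA^[iter + 1] p0 := by
        rw [hp]; exact (Function.iterate_succ_apply' rotateOnceA iter p0).symm
      cases hget : d.get? (rotateOnceA p) with
      | some prev =>
        show loopA fuel (iter + 1 + (1000000000 - (iter + 1)) / (iter + 1 - prev) * (iter + 1 - prev)) d (rotateOnceA p)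
          = rotateOnceA^[1000000000] p0
        obtain ⟨hs, h1, h2⟩ := hinv _ _ hget
        have hper : rotateOnceA^[prev + (iter + 1 - prev)] p0 = rotateOnceA^[prev] p0 := by
          rw [show prev + (iter + 1 - prev) = iter + 1 by omega, ← hp1, hs]
        have hle2 : iter + 1 + (1000000000 - (iter + 1)) / (iter + 1 - prev) * (iter + 1 - prev)
            ≤ 1000000000 := by
          have := Nat.div_mul_le_self (1000000000 - (iter + 1)) (iter + 1 - prev)
          omega
        apply ih _ d (rotateOnceA p) (by omega) hle2
        · have hpp := periodic rotateOnceA p0 prev (iter + 1 - prev) hper (iter + 1 - prev)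
            ((1000000000 - (iter + 1)) / (iter + 1 - prev))
          rw [show iter + 1 + (1000000000 - (iter + 1)) / (iter + 1 - prev) * (iter + 1 - prev)
              = prev + (iter + 1 - prev) + (1000000000 - (iter + 1)) / (iter + 1 - prev) * (iter + 1 - prev)
              by omega, hpp, show prev + (iter + 1 - prev) = iter + 1 by omega, ← hp1]
        · intro s j hj
          obtain ⟨a, b, c⟩ := hinv s j hj
          exact ⟨a, b, by omega⟩
      | none =>
        show loopA fuel (iter + 1) (d.insert (rotateOnceA p) (iter + 1)) (rotateOnceA p)
          = rotateOnceA^[1000000000] p0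
        apply ih (iter + 1) (d.insert (rotateOnceA p) (iter + 1)) (rotateOnceA p)
          (by omega) (by omega) hp1
        intro s j hj
        rw [PySem.Dict.get?_insert] at hj
        by_cases hes : s = rotateOnceA p
        · rw [if_pos hes] at hj
          cases hj
          exact ⟨hes ▸ hp1, by omega, le_rfl⟩
        · rw [if_neg hes] at hj
          obtain ⟨a, b, c⟩ := hinv s j hj
          exact ⟨a, b, by omega⟩

def InvB (p0 : List (List String)) (seen : PySem.Dict (List (List String)) Nat)
    (history : List (List (List String))) (i : Nat) : Prop :=
  (∀ s j, seen.get? s = some j → s = spinB^[j] p0 ∧ 1 ≤ j ∧ j ≤ i) ∧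
  history.length = i ∧ ∀ j, j < i → history.getD j [] = spinB^[j + 1] p0

theorem loopB_eq (p0 : List (List String)) : ∀ fuel i seen history cur,
    1000000000 - i ≤ fuel → i ≤ 1000000000 → cur = spinB^[i] p0 →
    InvB p0 seen history i → loopB fuel i seen history cur = spinB^[1000000000] p0 := by
  intro fuel
  induction fuel with
  | zero =>
    intro i seen history cur hf hle hp _
    have : i = 1000000000 := by omega
    rw [loopB, hp, this]
  | succ fuel ih =>
    intro i seen history cur hf hle hp hinv
    rw [loopB]
    by_cases hstop : 1000000000 ≤ i
    · rw [if_pos hstop, hp, show i = 1000000000 by omega]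
    · rw [if_neg hstop]
      show (match seen.get? (spinB cur) with
        | some start => history.getD (start + (1000000000 - start) % (i + 1 - start) - 1) []
        | none => loopB fuel (i + 1) (seen.insert (spinB cur) (i + 1)) (history ++ [spinB cur]) (spinB cur))
        = spinB^[1000000000] p0
      obtain ⟨hseen, hlen, hhist⟩ := hinv
      have hp1 : spinB cur = spinB^[i + 1] p0 := by
        rw [hp]; exact (Function.iterate_succ_apply' spinB i p0).symm
      cases hget : seen.get? (spinB cur) with
      | some start =>
        show history.getD (start + (1000000000 - start) % (i + 1 - start) - 1) []
          = spinB^[1000000000] p0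
        obtain ⟨hs, h1, h2⟩ := hseen _ _ hget
        have hL : 1 ≤ i + 1 - start := by omega
        have hr : (1000000000 - start) % (i + 1 - start) < i + 1 - start :=
          Nat.mod_lt _ (by omega)
        have hidxlt : start + (1000000000 - start) % (i + 1 - start) - 1 < i := by omega
        rw [hhist _ hidxlt,
          show start + (1000000000 - start) % (i + 1 - start) - 1 + 1
            = start + (1000000000 - start) % (i + 1 - start) by omega]
        have hper : spinB^[start + (i + 1 - start)] p0 = spinB^[start] p0 := by
          rw [show start + (i + 1 - start) = i + 1 by omega, ← hp1, hs]
        have hpp := periodic spinB p0 start (i + 1 - start) hper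
          ((1000000000 - start) % (i + 1 - start)) ((1000000000 - start) / (i + 1 - start))
        have hdm := Nat.div_add_mod (1000000000 - start) (i + 1 - start)
        have e : start + (1000000000 - start) % (i + 1 - start)
            + (1000000000 - start) / (i + 1 - start) * (i + 1 - start) = 1000000000 := by
          rw [Nat.mul_comm]; omega
        conv_rhs => rw [← e]
        exact hpp.symm
      | none =>
        show loopB fuel (i + 1) (seen.insert (spinB cur) (i + 1)) (history ++ [spinB cur]) (spinB cur)
          = spinB^[1000000000] p0
        apply ih (i + 1) (seen.insert (spinB cur) (i + 1)) (history ++ [spinB cur]) (spinB cur)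
          (by omega) (by omega) hp1
        refine ⟨?_, by simp [hlen], ?_⟩
        · intro s j hj
          rw [PySem.Dict.get?_insert] at hj
          by_cases hes : s = spinB cur
          · rw [if_pos hes] at hj
            cases hj
            exact ⟨hes ▸ hp1, by omega, le_rfl⟩
          · rw [if_neg hes] at hj
            obtain ⟨a, b, c⟩ := hseen s j hj
            exact ⟨a, b, by omega⟩
        · intro j hj
          by_cases hji : j < i
          · have e : (history ++ [spinB cur]).getD j [] = history.getD j [] := by
              simp only [List.getD_eq_getElem?_getD,
                List.getElem?_append_left (show j < history.length by omega)]
            rw [e]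
            exact hhist j hji
          · have hje : j = i := by omega
            subst hje
            subst hlen
            have e : (history ++ [spinB cur]).getD history.length [] = spinB cur := by
              simp
            rw [e]
            exact hp1

-- ===== VERDICT (by name: the statement is the Claim_ definition above) =====
theorem rotatePlatformOften_spec : Claim_equal_rotatePlatformOften := by
  intro platform _dom
  show rotatePlatformOften platform = rotatePlatformOften_alt platform
  have hA : rotatePlatformOften platform = rotateOnceA^[1000000000] platform := by
    apply loopA_eq <;> first
      | (intro s j h; simp [PySem.Dict.get?_empty] at h)
      | simp
  have hB : rotatePlatformOften_alt platform = spinB^[1000000000] platform := by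
    apply loopB_eq
    · omega
    · omega
    · simp
    · exact ⟨fun s j h => by simp [PySem.Dict.get?_empty] at h, rfl, fun j hj => by omega⟩
  rw [hA, hB, spin_eq]
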